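-- pv_equiv track=rewrite | github.com/cristiandel48-spec/ingeanclajes2 | fix_all_templates.py | convert_template_literal
-- ===== SOURCE A (Python) =====
-- def convert_template_literal(inner):
--     """Convert template literal content to string concatenation."""
--     parts = []
--     i = 0
--     current_str = ""
--     while i < len(inner):
--         if inner[i:i+2] == '${':
--             depth = 1
--             j = i + 2
--             while j < len(inner) and depth > 0:
--                 if inner[j] == '{': depth += 1
--                 elif inner[j] == '}': depth -= 1
--                 j += 1
--             expr = inner[i+2:j-1]
--             if current_str:
--                 parts.append('"' + current_str.replace('\\', '\\\\').replace('"', '\\"') + '"')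
--                 current_str = ""
--             parts.append('(' + expr + ')')
--             i = j
--         else:
--             current_str += inner[i]
--             i += 1
--     if current_str:
--         parts.append('"' + current_str.replace('\\', '\\\\').replace('"', '\\"') + '"')
--     if not parts:
--         return '""'
--     return ' + '.join(parts) if len(parts) > 1 else parts[0]
-- ===== SOURCE B (Python) =====
-- def convert_template_literal(inner):
--     """Convert template literal content to string concatenation."""
--     def esc(s):
--         return '"' + s.replace('\\', '\\\\').replace('"', '\\"') + '"'
--     parts = []
--     i = 0
--     n = len(inner)
--     while i < n:
--         pos = inner.find('${', i)
--         if pos == -1: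
--             parts.append(esc(inner[i:]))
--             break
--         if pos > i:
--             parts.append(esc(inner[i:pos]))
--         depth = 1
--         j = pos + 2
--         while j < n and depth > 0:
--             if inner[j] == '{': depth += 1
--             elif inner[j] == '}': depth -= 1
--             j += 1
--         parts.append('(' + inner[pos+2:j-1] + ')')
--         i = j
--     if not parts:
--         return '""'
--     return parts[0] if len(parts) == 1 else ' + '.join(parts)
-- ===== Notes on version B (the rewrite author's own statement) =====
-- stated objective: faster
-- what changed: B replaces A's per-character accumulation loop (current_str grown one char at a time, quadratic in long literal runs) with a segment-oriented scan: str.find locates the next interpolation opener and each literal run is emitted as one slice; only the depth-counting brace scan is kept.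
import Mathlib
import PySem

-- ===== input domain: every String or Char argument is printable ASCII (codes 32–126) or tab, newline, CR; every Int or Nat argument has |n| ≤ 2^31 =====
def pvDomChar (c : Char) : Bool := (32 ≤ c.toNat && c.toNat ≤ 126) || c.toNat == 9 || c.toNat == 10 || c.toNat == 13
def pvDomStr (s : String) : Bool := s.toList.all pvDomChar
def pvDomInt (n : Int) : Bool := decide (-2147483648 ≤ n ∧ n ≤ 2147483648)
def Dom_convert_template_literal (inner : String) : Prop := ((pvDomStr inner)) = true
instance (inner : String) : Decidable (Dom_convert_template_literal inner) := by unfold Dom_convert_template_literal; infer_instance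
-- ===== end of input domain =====

-- B scans segment-wise with str.find + one-slice literal runs instead of A's per-character
-- current_str accumulation; same return value, proved equal on all strings.

-- shared helper: '"' + s.replace('\\','\\\\').replace('"','\\"') + '"'  (both Pythons contain this expression)
def pvEsc (cs : List Char) : List Char :=
  '"' :: (PySem.Chars.replace (PySem.Chars.replace cs ['\\'] ['\\', '\\']) ['"'] ['\\', '"']) ++ ['"']

-- shared helper: the depth-counting brace scan both Pythons contain verbatim.
-- Consumes chars from position i+2 on; returns (chars consumed before the terminating '}',
-- the remaining suffix after j, and whether a matching '}' was found (j stopped with depth 0)).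
def pvScanBrace : List Char → Int → List Char × List Char × Bool
  | [], _ => ([], [], false)
  | c :: cs, depth =>
    let depth' := if c = '{' then depth + 1 else if c = '}' then depth - 1 else depth
    if depth' = 0 then ([], cs, true)
    else
      let r := pvScanBrace cs depth'
      (c :: r.1, r.2.1, r.2.2)

theorem pvScanBrace_len (cs : List Char) : ∀ d, (pvScanBrace cs d).2.1.length ≤ cs.length := by
  induction cs with
  | nil => intro d; simp [pvScanBrace]
  | cons c cs ih =>
    intro d
    simp only [pvScanBrace]
    generalize (if c = '{' then d + 1 else if c = '}' then d - 1 else d) = d'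
    split
    · simp
    · have := ih d'; simp; omega

-- ===== PORT A =====
-- A's main while loop: state = (remaining suffix, current_str, parts); the unterminated-opener
-- case (j reaches len) is inner[i+2:j-1] = dropLast of everything consumed.
def pvGoA : List Char → List Char → List (List Char) → List (List Char)
  | [], cur, parts => if cur ≠ [] then parts ++ [pvEsc cur] else parts
  | '$' :: '{' :: cs, cur, parts =>
    let r := pvScanBrace cs 1
    let expr := if r.2.2 then r.1 else r.1.dropLast
    let parts1 := if cur ≠ [] then parts ++ [pvEsc cur] else parts
    pvGoA r.2.1 [] (parts1 ++ ['(' :: expr ++ [')']])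
  | c :: cs, cur, parts => pvGoA cs (cur ++ [c]) parts
termination_by rest => rest.length
decreasing_by
  · have := pvScanBrace_len cs 1; simp; omega
  · simp

def convert_template_literal (inner : String) : String :=
  let parts := pvGoA inner.toList [] []
  if parts = [] then "\"\""
  else if parts.length > 1 then String.ofList (PySem.Chars.join [' ', '+', ' '] parts)
  else String.ofList (parts.headD [])

-- ===== PORT B =====
-- port of inner.find(opener, i) plus the slices inner[i:pos] / inner[pos+2:]: returns none if
-- no interpolation opener occurs, else (the literal run before the first opener, the suffix after it)
def pvFindSplit : List Char → Option (List Char × List Char)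
  | [] => none
  | '$' :: '{' :: cs => some ([], cs)
  | c :: cs => (pvFindSplit cs).map (fun p => (c :: p.1, p.2))

theorem pvFindSplit_some {rest b a : List Char}
    (h : pvFindSplit rest = some (b, a)) : rest = b ++ '$' :: '{' :: a := by
  fun_induction pvFindSplit rest generalizing b a with
  | case1 => simp at h
  | case2 cs => simp only [Option.some.injEq, Prod.mk.injEq] at h; obtain ⟨h1, h2⟩ := h; subst h1; subst h2; rfl
  | case3 c cs h2 ih =>
    simp only [Option.map_eq_some_iff] at h
    obtain ⟨⟨b', a'⟩, hp, he⟩ := h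
    cases he
    simpa using ih hp

-- B's main while loop: no current_str; each iteration emits the whole literal slice (if
-- non-empty) and then the interpolation, via the same brace scan.
def pvGoB : List Char → List (List Char) → List (List Char)
  | rest, parts =>
    match h : pvFindSplit rest with
    | none => if rest ≠ [] then parts ++ [pvEsc rest] else parts
    | some (lit, cs) =>
      let parts1 := if lit ≠ [] then parts ++ [pvEsc lit] else parts
      let r := pvScanBrace cs 1
      let expr := if r.2.2 then r.1 else r.1.dropLast
      pvGoB r.2.1 (parts1 ++ ['(' :: expr ++ [')']])
termination_by rest => rest.length
decreasing_by
  have hr := pvFindSplit_some h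
  have := pvScanBrace_len cs 1
  subst hr; simp; omega

def convert_template_literal_alt (inner : String) : String :=
  let parts := pvGoB inner.toList []
  if parts = [] then "\"\""
  else if parts.length == 1 then String.ofList (parts.headD [])
  else String.ofList (PySem.Chars.join [' ', '+', ' '] parts)

-- ===== PRECONDITION & SPEC =====
def Spec_convert_template_literal (inner : String) (out : String) : Prop := out = convert_template_literal_alt inner
instance (inner : String) (out : String) : Decidable (Spec_convert_template_literal inner out) := by unfold Spec_convert_template_literal; infer_instance

-- ===== CLAIM (what is proved, stated in full; the proofs are below) =====
def Claim_equal_convert_template_literal : Prop := ∀ (inner : String), Dom_convert_template_literal inner → Spec_convert_template_literal inner (convert_template_literal inner)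

-- ===== LEMMAS AND PROOFS =====

theorem pvGoA_none {rest : List Char} (h : pvFindSplit rest = none) :
    ∀ cur parts, pvGoA rest cur parts =
      if cur ++ rest ≠ [] then parts ++ [pvEsc (cur ++ rest)] else parts := by
  fun_induction pvFindSplit rest with
  | case1 => intro cur parts; simp [pvGoA]
  | case2 cs => simp at h
  | case3 c cs h2 ih =>
    intro cur parts
    simp only [Option.map_eq_none_iff] at h
    rw [pvGoA.eq_def]
    split
    · rename_i heq; simp at heq
    · rename_i cs' heq2
      simp only [List.cons.injEq] at heq2
      exact ((h2 _ heq2.1 heq2.2).elim : _)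
    · rename_i c' cs' hg heq
      simp only [List.cons.injEq] at heq
      obtain ⟨rfl, rfl⟩ := heq
      rw [ih h]
      simp

theorem pvGoA_some {rest lit cs : List Char} (h : pvFindSplit rest = some (lit, cs)) :
    ∀ cur parts, pvGoA rest cur parts =
      pvGoA (pvScanBrace cs 1).2.1 []
        ((if cur ++ lit ≠ [] then parts ++ [pvEsc (cur ++ lit)] else parts) ++
         ['(' :: (if (pvScanBrace cs 1).2.2 then (pvScanBrace cs 1).1
                  else (pvScanBrace cs 1).1.dropLast) ++ [')']]) := by
  fun_induction pvFindSplit rest generalizing lit cs with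
  | case1 => simp at h
  | case2 cs0 =>
    simp only [Option.some.injEq, Prod.mk.injEq] at h
    obtain ⟨h1, h2⟩ := h; subst h1; subst h2
    intro cur parts
    simp [pvGoA]
  | case3 c cs0 h2 ih =>
    intro cur parts
    simp only [Option.map_eq_some_iff] at h
    obtain ⟨⟨b', a'⟩, hp, he⟩ := h
    cases he
    rw [pvGoA.eq_def]
    split
    · rename_i heq; simp at heq
    · rename_i cs' heq2
      simp only [List.cons.injEq] at heq2
      exact ((h2 _ heq2.1 heq2.2).elim : _)
    · rename_i c' cs' hg heq
      simp only [List.cons.injEq] at heq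
      obtain ⟨rfl, rfl⟩ := heq
      rw [ih hp]
      simp

theorem pvGoA_eq_pvGoB (rest : List Char) (parts : List (List Char)) :
    pvGoA rest [] parts = pvGoB rest parts := by
  fun_induction pvGoB rest parts with
  | case1 rest parts hnone h =>
    rw [pvGoA_none hnone]; simp_all
  | case2 rest parts hnone h =>
    rw [pvGoA_none hnone]; simp_all
  | case3 rest parts lit cs hsome parts1 r expr ih =>
    rw [pvGoA_some hsome]
    simpa [parts1, r, expr] using ih

-- ===== VERDICT (by name: the statement is the Claim_ definition above) =====
theorem convert_template_literal_spec : Claim_equal_convert_template_literal := by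
  intro inner _
  unfold Spec_convert_template_literal convert_template_literal convert_template_literal_alt
  rw [pvGoA_eq_pvGoB]
  generalize pvGoB inner.toList [] = parts
  by_cases h : parts = []
  · simp [h]
  · have hl : parts.length ≠ 0 := by simpa using h
    by_cases h1 : parts.length = 1
    · simp [h, h1]
    · have h2 : 1 < parts.length := by omega
      simp [h, h1, h2]
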